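-- pv_equiv track=rewrite | github.com/Rabia-Nasreen/My-Master-Thesis-Project | MTP_Code.py | calculate_detailed_metrics
-- ===== SOURCE A (Python) =====
-- def calculate_detailed_metrics(predicted_ranges, actual_ranges):
--     tp_count = 0
--     fp_count = 0
--     fn_count = 0
--
--     # Convert ranges into sets of indices for easy comparison
--     predicted_sets = [set(range(start, end + 1)) for start, end in predicted_ranges]
--     actual_sets = [set(range(start, end + 1)) for start, end in actual_ranges]
--
--     matched_predicted = set()  # Keep track of matched predicted ranges
--     matched_actual = set()     # Keep track of matched actual ranges
--
--     # Calculate True Positives and False Negatives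
--     for i, actual in enumerate(actual_sets):
--         tp_found = False
--         for j, predicted in enumerate(predicted_sets):
--             if actual & predicted:  # Overlap exists
--                 tp_found = True
--                 matched_predicted.add(j)  # Mark predicted range as matched
--                 matched_actual.add(i)     # Mark actual range as matched
--         if tp_found:
--             tp_count += 1
--         else:
--             fn_count += 1  # No overlap found for this actual range
--
--     # Calculate False Positives
--     for j, predicted in enumerate(predicted_sets):
--         if j not in matched_predicted:
--             fp_count += 1
--
--     return tp_count, fp_count, fn_count
-- ===== SOURCE B (Python) =====
-- def calculate_detailed_metrics(predicted_ranges, actual_ranges):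
--     # Sort-and-binary-search: index each side once (non-empty ranges sorted by
--     # start, with a running prefix-maximum of ends), then answer every
--     # "does any range overlap [s, e]?" query in O(log n) instead of scanning.
--
--     def build(ranges):
--         srt = sorted([r for r in ranges if r[0] <= r[1]], key=lambda r: r[0])
--         starts = [r[0] for r in srt]
--         maxends = []
--         best = None
--         for r in srt:
--             best = r[1] if best is None or r[1] > best else best
--             maxends.append(best)
--         return starts, maxends
--
--     def hits(index, s, e):
--         # True iff some indexed range overlaps the closed range [s, e].
--         starts, maxends = index
--         if s > e:
--             return False
--         lo, hi = 0, len(starts)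
--         while lo < hi:                       # bisect_right(starts, e)
--             mid = (lo + hi) // 2
--             if starts[mid] <= e:
--                 lo = mid + 1
--             else:
--                 hi = mid
--         return lo > 0 and maxends[lo - 1] >= s
--
--     pidx = build(predicted_ranges)
--     aidx = build(actual_ranges)
--     tp = sum(1 for a in actual_ranges if hits(pidx, a[0], a[1]))
--     fn = len(actual_ranges) - tp
--     fp = sum(1 for p in predicted_ranges if not hits(aidx, p[0], p[1]))
--     return tp, fp, fn
-- ===== Notes on version B (the rewrite author's own statement) =====
-- stated objective: faster
-- what changed: Replaces A's all-pairs comparison of materialised index sets by a sort-and-binary-search index: each side's non-empty ranges are sorted by start with a prefix-maximum of ends, and every overlap query is answered by one binary search instead of scanning the other list.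
import Mathlib
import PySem

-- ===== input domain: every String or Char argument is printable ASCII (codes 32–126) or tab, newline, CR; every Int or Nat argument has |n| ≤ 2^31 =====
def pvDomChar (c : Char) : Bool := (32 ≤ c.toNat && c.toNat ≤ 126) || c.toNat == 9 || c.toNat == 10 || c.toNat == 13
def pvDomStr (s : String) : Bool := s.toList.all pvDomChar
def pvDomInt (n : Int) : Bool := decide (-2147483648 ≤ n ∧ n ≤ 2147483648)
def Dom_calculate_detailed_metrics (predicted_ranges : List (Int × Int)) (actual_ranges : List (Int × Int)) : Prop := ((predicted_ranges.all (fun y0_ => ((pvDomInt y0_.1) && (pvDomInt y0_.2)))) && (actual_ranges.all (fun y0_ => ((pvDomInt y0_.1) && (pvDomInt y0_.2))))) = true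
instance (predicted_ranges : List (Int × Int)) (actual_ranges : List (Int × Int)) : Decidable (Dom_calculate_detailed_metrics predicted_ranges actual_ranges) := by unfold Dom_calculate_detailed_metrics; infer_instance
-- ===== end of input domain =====

-- B replaces A's all-pairs intersection of materialised index sets by a
-- sort-and-binary-search index (non-empty ranges sorted by start with a
-- prefix-maximum of ends): an asymptotically faster exact re-implementation.

-- ===== PORT A =====
-- set(range(start, end + 1))
def pvASetOf (r : Int × Int) : PySem.Set Int :=
  PySem.Set.ofList (PySem.List.pyRange r.1 (r.2 + 1) 1)

def calculate_detailed_metrics (predicted_ranges : List (Int × Int)) (actual_ranges : List (Int × Int)) : Int × Int × Int :=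
  let predicted_sets := predicted_ranges.map pvASetOf
  let actual_sets := actual_ranges.map pvASetOf
  -- state: (tp_count, fn_count, matched_predicted, matched_actual)
  let st := (PySem.List.enumerate actual_sets).foldl
    (fun (st : Int × Int × PySem.Set Int × PySem.Set Int) ia =>
      -- inner state: (tp_found, matched_predicted, matched_actual)
      let inner := (PySem.List.enumerate predicted_sets).foldl
        (fun (s : Bool × PySem.Set Int × PySem.Set Int) jp =>
          if PySem.Set.inter ia.2 jp.2 ≠ [] then
            (true, PySem.Set.add s.2.1 jp.1, PySem.Set.add s.2.2 ia.1)
          else s)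
        (false, st.2.2.1, st.2.2.2)
      if inner.1 then (st.1 + 1, st.2.1, inner.2.1, inner.2.2)
      else (st.1, st.2.1 + 1, inner.2.1, inner.2.2))
    (0, 0, PySem.Set.empty, PySem.Set.empty)
  let fp := (PySem.List.enumerate predicted_sets).foldl
    (fun (fp : Int) jp => if ¬ (PySem.Set.contains st.2.2.1 jp.1 = true) then fp + 1 else fp) 0
  (st.1, fp, st.2.1)

-- ===== PORT B =====
-- the 'best = … ; maxends.append(best)' loop of build()
def pvMaxends (best : Option Int) : List (Int × Int) → List Int
  | [] => []
  | r :: rs =>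
      let b := match best with
        | none => r.2
        | some b0 => if r.2 > b0 then r.2 else b0
      b :: pvMaxends (some b) rs

-- build(ranges): non-empty ranges sorted by start; (starts, prefix-max ends)
def pvBuild (ranges : List (Int × Int)) : List Int × List Int :=
  let srt := PySem.List.sorted (ranges.filter (fun r => decide (r.1 ≤ r.2))) (fun r => r.1) false
  (srt.map (fun r => r.1), pvMaxends none srt)

-- the hand-rolled bisect_right while-loop of hits(); the loop keeps mid in
-- range, so the total getD indexing is exact
def pvBisect (starts : List Int) (e : Int) (lo hi : Nat) : Nat :=
  if _h : lo < hi then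
    let mid := (lo + hi) / 2
    if starts.getD mid 0 ≤ e then pvBisect starts e (mid + 1) hi
    else pvBisect starts e lo mid
  else lo
termination_by hi - lo
decreasing_by all_goals omega

-- hits(index, s, e)
def pvHits (index : List Int × List Int) (s e : Int) : Bool :=
  if s > e then false
  else
    let lo := pvBisect index.1 e 0 index.1.length
    decide (0 < lo) && decide (s ≤ index.2.getD (lo - 1) 0)

def calculate_detailed_metrics_alt (predicted_ranges : List (Int × Int)) (actual_ranges : List (Int × Int)) : Int × Int × Int :=
  let pidx := pvBuild predicted_ranges
  let aidx := pvBuild actual_ranges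
  let tp : Int := (actual_ranges.countP (fun a => pvHits pidx a.1 a.2) : Int)
  let fn : Int := (actual_ranges.length : Int) - tp
  let fp : Int := (predicted_ranges.countP (fun p => !(pvHits aidx p.1 p.2)) : Int)
  (tp, fp, fn)

-- ===== PRECONDITION & SPEC =====
def Spec_calculate_detailed_metrics (predicted_ranges : List (Int × Int)) (actual_ranges : List (Int × Int)) (out : Int × Int × Int) : Prop := out = calculate_detailed_metrics_alt predicted_ranges actual_ranges
instance (predicted_ranges : List (Int × Int)) (actual_ranges : List (Int × Int)) (out : Int × Int × Int) : Decidable (Spec_calculate_detailed_metrics predicted_ranges actual_ranges out) := by unfold Spec_calculate_detailed_metrics; infer_instance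

-- ===== CLAIM (what is proved, stated in full; the proofs are below) =====
def Claim_equal_calculate_detailed_metrics : Prop := ∀ (predicted_ranges : List (Int × Int)) (actual_ranges : List (Int × Int)), Dom_calculate_detailed_metrics predicted_ranges actual_ranges → Spec_calculate_detailed_metrics predicted_ranges actual_ranges (calculate_detailed_metrics predicted_ranges actual_ranges)

-- ===== LEMMAS AND PROOFS =====

-- overlap of two closed integer ranges, the common denominator of both proofs
def pvOverlaps (p a : Int × Int) : Bool := decide (max p.1 a.1 ≤ min p.2 a.2)

-- A's set-intersection test agrees with the interval test (as a decide-level equation).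
lemma pv_inter_decide (a p : Int × Int) :
    decide (PySem.Set.inter (pvASetOf a) (pvASetOf p) ≠ []) = pvOverlaps p a := by
  unfold pvOverlaps
  rw [decide_eq_decide]
  constructor
  · intro h
    obtain ⟨x, hx⟩ := List.exists_mem_of_ne_nil _ h
    rw [PySem.Set.mem_inter] at hx
    simp only [pvASetOf, PySem.Set.mem_ofList, PySem.List.mem_pyRange_one] at hx
    omega
  · intro h hnil
    have hmem : (max p.1 a.1) ∈ PySem.Set.inter (pvASetOf a) (pvASetOf p) := by
      rw [PySem.Set.mem_inter]
      simp only [pvASetOf, PySem.Set.mem_ofList, PySem.List.mem_pyRange_one]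
      omega
    rw [hnil] at hmem
    exact List.not_mem_nil hmem

-- proof-side names for A's two folds (definitionally the ones in the port)
def pvInner (P : List (Int × PySem.Set Int)) (av : PySem.Set Int) (i1 : Int)
    (b : Bool) (mp ma : PySem.Set Int) : Bool × PySem.Set Int × PySem.Set Int :=
  P.foldl (fun (s : Bool × PySem.Set Int × PySem.Set Int) jp =>
      if PySem.Set.inter av jp.2 ≠ [] then
        (true, PySem.Set.add s.2.1 jp.1, PySem.Set.add s.2.2 i1)
      else s) (b, mp, ma)

def pvOuter (P L : List (Int × PySem.Set Int)) (st0 : Int × Int × PySem.Set Int × PySem.Set Int) :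
    Int × Int × PySem.Set Int × PySem.Set Int :=
  L.foldl (fun st ia =>
      let inner := pvInner P ia.2 ia.1 false st.2.2.1 st.2.2.2
      if inner.1 then (st.1 + 1, st.2.1, inner.2.1, inner.2.2)
      else (st.1, st.2.1 + 1, inner.2.1, inner.2.2)) st0

lemma pvA_eq (predicted_ranges actual_ranges : List (Int × Int)) :
    calculate_detailed_metrics predicted_ranges actual_ranges =
      (let P := PySem.List.enumerate (predicted_ranges.map pvASetOf) 0
       let st := pvOuter P (PySem.List.enumerate (actual_ranges.map pvASetOf) 0)
         (0, 0, PySem.Set.empty, PySem.Set.empty)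
       let fp := P.foldl
         (fun (fp : Int) jp => if ¬ (PySem.Set.contains st.2.2.1 jp.1 = true) then fp + 1 else fp) 0
       (st.1, fp, st.2.1)) := rfl

lemma pvInner_fst (P : List (Int × PySem.Set Int)) (av : PySem.Set Int) (i1 : Int)
    (b : Bool) (mp ma : PySem.Set Int) :
    (pvInner P av i1 b mp ma).1
      = (b || P.any (fun jp => decide (PySem.Set.inter av jp.2 ≠ []))) := by
  induction P generalizing b mp ma with
  | nil => simp [pvInner]
  | cons x xs ih =>
    simp only [pvInner, List.foldl_cons, List.any_cons] at *
    split_ifs with h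
    · rw [ih]; simp [h]
    · rw [ih]; simp [h]

lemma pvInner_mp (P : List (Int × PySem.Set Int)) (av : PySem.Set Int) (i1 : Int)
    (b : Bool) (mp ma : PySem.Set Int) (x : Int) :
    x ∈ (pvInner P av i1 b mp ma).2.1
      ↔ x ∈ mp ∨ ∃ jp ∈ P, jp.1 = x ∧ PySem.Set.inter av jp.2 ≠ [] := by
  induction P generalizing b mp ma with
  | nil => simp [pvInner]
  | cons y ys ih =>
    simp only [pvInner, List.foldl_cons] at *
    split_ifs with h
    · rw [ih]
      simp only [PySem.Set.mem_add, List.mem_cons]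
      constructor
      · rintro (⟨hm | rfl⟩ | ⟨jp, hjp, h1, h2⟩)
        · exact Or.inl hm
        · exact Or.inr ⟨y, Or.inl rfl, rfl, h⟩
        · exact Or.inr ⟨jp, Or.inr hjp, h1, h2⟩
      · rintro (hm | ⟨jp, (rfl | hjp), h1, h2⟩)
        · exact Or.inl (Or.inl hm)
        · exact Or.inl (Or.inr h1.symm)
        · exact Or.inr ⟨jp, hjp, h1, h2⟩
    · rw [ih]
      simp only [List.mem_cons]
      constructor
      · rintro (hm | ⟨jp, hjp, h1, h2⟩)
        · exact Or.inl hm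
        · exact Or.inr ⟨jp, Or.inr hjp, h1, h2⟩
      · rintro (hm | ⟨jp, (rfl | hjp), h1, h2⟩)
        · exact Or.inl hm
        · exact absurd h2 h
        · exact Or.inr ⟨jp, hjp, h1, h2⟩

lemma pvOuter_tp (P L : List (Int × PySem.Set Int)) (tp fn : Int) (mp ma : PySem.Set Int) :
    (pvOuter P L (tp, fn, mp, ma)).1
      = tp + (L.countP (fun ia => P.any (fun jp => decide (PySem.Set.inter ia.2 jp.2 ≠ []))) : Int) := by
  induction L generalizing tp fn mp ma with
  | nil => simp [pvOuter]
  | cons x xs ih =>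
    simp only [pvOuter, List.foldl_cons, List.countP_cons] at *
    rw [pvInner_fst]
    by_cases hb : P.any (fun jp => decide (PySem.Set.inter x.2 jp.2 ≠ [])) = true
    · simp only [hb, Bool.false_or, if_true, ih]
      simp
      try push_cast
      try omega
    · simp only [Bool.not_eq_true] at hb
      simp only [hb, Bool.false_or, ih]
      simp
      try push_cast
      try omega

lemma pvOuter_fn (P L : List (Int × PySem.Set Int)) (tp fn : Int) (mp ma : PySem.Set Int) :
    (pvOuter P L (tp, fn, mp, ma)).2.1
      = fn + (L.countP (fun ia => !(P.any (fun jp => decide (PySem.Set.inter ia.2 jp.2 ≠ [])))) : Int) := by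
  induction L generalizing tp fn mp ma with
  | nil => simp [pvOuter]
  | cons x xs ih =>
    simp only [pvOuter, List.foldl_cons, List.countP_cons] at *
    rw [pvInner_fst]
    by_cases hb : P.any (fun jp => decide (PySem.Set.inter x.2 jp.2 ≠ [])) = true
    · simp only [hb, Bool.false_or, if_true, ih]
      simp
      try push_cast
      try omega
    · simp only [Bool.not_eq_true] at hb
      simp only [hb, Bool.false_or, ih]
      simp
      try push_cast
      try omega

lemma pvOuter_mp (P L : List (Int × PySem.Set Int)) (tp fn : Int) (mp ma : PySem.Set Int) (x : Int) :
    x ∈ (pvOuter P L (tp, fn, mp, ma)).2.2.1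
      ↔ x ∈ mp ∨ ∃ jp ∈ P, jp.1 = x ∧ ∃ ia ∈ L, PySem.Set.inter ia.2 jp.2 ≠ [] := by
  induction L generalizing tp fn mp ma with
  | nil => simp [pvOuter]
  | cons y ys ih =>
    simp only [pvOuter, List.foldl_cons] at *
    by_cases hb : (pvInner P y.2 y.1 false mp ma).1 = true
    · simp only [hb, if_true]
      rw [ih, pvInner_mp]
      simp only [List.mem_cons]
      constructor
      · rintro ((hm | ⟨jp, hjp, h1, h2⟩) | ⟨jp, hjp, h1, ia, hia, h2⟩)
        · exact Or.inl hm
        · exact Or.inr ⟨jp, hjp, h1, y, Or.inl rfl, h2⟩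
        · exact Or.inr ⟨jp, hjp, h1, ia, Or.inr hia, h2⟩
      · rintro (hm | ⟨jp, hjp, h1, ia, (rfl | hia), h2⟩)
        · exact Or.inl (Or.inl hm)
        · exact Or.inl (Or.inr ⟨jp, hjp, h1, h2⟩)
        · exact Or.inr ⟨jp, hjp, h1, ia, hia, h2⟩
    · simp only [Bool.not_eq_true] at hb
      simp only [hb, Bool.false_eq_true, if_false]
      rw [ih, pvInner_mp]
      simp only [List.mem_cons]
      constructor
      · rintro ((hm | ⟨jp, hjp, h1, h2⟩) | ⟨jp, hjp, h1, ia, hia, h2⟩)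
        · exact Or.inl hm
        · exact Or.inr ⟨jp, hjp, h1, y, Or.inl rfl, h2⟩
        · exact Or.inr ⟨jp, hjp, h1, ia, Or.inr hia, h2⟩
      · rintro (hm | ⟨jp, hjp, h1, ia, (rfl | hia), h2⟩)
        · exact Or.inl (Or.inl hm)
        · exact Or.inl (Or.inr ⟨jp, hjp, h1, h2⟩)
        · exact Or.inr ⟨jp, hjp, h1, ia, hia, h2⟩

lemma pv_fp_fold (mp : PySem.Set Int) (P : List (Int × PySem.Set Int)) (z : Int) :
    P.foldl (fun (fp : Int) jp => if ¬ (PySem.Set.contains mp jp.1 = true) then fp + 1 else fp) z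
      = z + (P.countP (fun jp => !PySem.Set.contains mp jp.1) : Int) := by
  induction P generalizing z with
  | nil => simp
  | cons x xs ih =>
    simp only [List.foldl_cons, List.countP_cons, ih]
    by_cases h : x.1 ∈ mp <;> simp [h] <;> push_cast <;> omega

-- '∃ overlapping pair in enumerate(actual_sets)' read back on actual_ranges
lemma pv_exists_enum (ar : List (Int × Int)) (t : PySem.Set Int) (s : Int) :
    (∃ ia ∈ PySem.List.enumerate (ar.map pvASetOf) s, PySem.Set.inter ia.2 t ≠ [])
      ↔ ∃ a ∈ ar, PySem.Set.inter (pvASetOf a) t ≠ [] := by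
  induction ar generalizing s with
  | nil => simp [PySem.List.enumerate_nil]
  | cons a as ih =>
    simp only [List.map_cons, PySem.List.enumerate_cons, List.mem_cons]
    constructor
    · rintro ⟨ia, (rfl | hia), h⟩
      · exact ⟨a, Or.inl rfl, h⟩
      · obtain ⟨b, hb, h2⟩ := (ih (s + 1)).mp ⟨ia, hia, h⟩
        exact ⟨b, Or.inr hb, h2⟩
    · rintro ⟨b, (rfl | hb), h⟩
      · exact ⟨(s, pvASetOf b), Or.inl rfl, h⟩
      · obtain ⟨ia, hia, h2⟩ := (ih (s + 1)).mpr ⟨b, hb, h⟩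
        exact ⟨ia, Or.inr hia, h2⟩

-- the tp_found test over enumerate(predicted_sets), read back on predicted_ranges
lemma pv_anyov_aux (pr : List (Int × Int)) (t : PySem.Set Int) (s : Int) :
    ((PySem.List.enumerate (pr.map pvASetOf) s).any
        (fun jp => decide (PySem.Set.inter t jp.2 ≠ [])))
      = pr.any (fun p => decide (PySem.Set.inter t (pvASetOf p) ≠ [])) := by
  induction pr generalizing s with
  | nil => simp [PySem.List.enumerate_nil]
  | cons p ps ih =>
    simp only [List.map_cons, PySem.List.enumerate_cons, List.any_cons, ih]

-- tp / fn counts over enumerate(actual_sets), read back on actual_ranges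
lemma pv_tpcnt_aux (pr ar : List (Int × Int)) (s : Int) :
    ((PySem.List.enumerate (ar.map pvASetOf) s).countP
        (fun ia => (PySem.List.enumerate (pr.map pvASetOf) 0).any
          (fun jp => decide (PySem.Set.inter ia.2 jp.2 ≠ []))))
      = ar.countP (fun a => pr.any (fun p => pvOverlaps p a)) := by
  induction ar generalizing s with
  | nil => simp [PySem.List.enumerate_nil]
  | cons a as ih =>
    simp only [List.map_cons, PySem.List.enumerate_cons, List.countP_cons]
    rw [ih, pv_anyov_aux]
    simp only [pv_inter_decide]

lemma pv_fncnt_aux (pr ar : List (Int × Int)) (s : Int) :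
    ((PySem.List.enumerate (ar.map pvASetOf) s).countP
        (fun ia => !((PySem.List.enumerate (pr.map pvASetOf) 0).any
          (fun jp => decide (PySem.Set.inter ia.2 jp.2 ≠ [])))))
      = ar.countP (fun a => !(pr.any (fun p => pvOverlaps p a))) := by
  induction ar generalizing s with
  | nil => simp [PySem.List.enumerate_nil]
  | cons a as ih =>
    simp only [List.map_cons, PySem.List.enumerate_cons, List.countP_cons]
    rw [ih, pv_anyov_aux]
    simp only [pv_inter_decide]

-- fp count over enumerate(predicted_sets) for a set-valued test on the second component
lemma pv_fpcnt_aux (ar pr : List (Int × Int)) (s : Int) :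
    ((PySem.List.enumerate (pr.map pvASetOf) s).countP
        (fun jp => !(ar.any (fun a => decide (PySem.Set.inter (pvASetOf a) jp.2 ≠ [])))))
      = pr.countP (fun p => !(ar.any (fun a => pvOverlaps p a))) := by
  induction pr generalizing s with
  | nil => simp [PySem.List.enumerate_nil]
  | cons p ps ih =>
    simp only [List.map_cons, PySem.List.enumerate_cons, List.countP_cons, ih, pv_inter_decide]

lemma pv_enum_index_inj {α : Type} {xs : List α} {s : Int} {p q : Int × α}
    (hp : p ∈ PySem.List.enumerate xs s) (hq : q ∈ PySem.List.enumerate xs s)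
    (h : p.1 = q.1) : p = q := by
  rw [PySem.List.mem_enumerate_iff] at hp hq
  obtain ⟨k, hk, rfl⟩ := hp
  obtain ⟨k', hk', rfl⟩ := hq
  simp only at h
  have : k = k' := by omega
  subst this
  rfl

lemma pv_cnt_split {α : Type} (p : α → Bool) (l : List α) :
    l.countP p + l.countP (fun a => !p a) = l.length := by
  induction l with
  | nil => simp
  | cons x xs ih =>
    by_cases h : p x = true <;> simp [List.countP_cons, h, ← ih] <;> omega

-- A reduced to the canonical countP triple over pvOverlaps
lemma pvA_countP (pr ar : List (Int × Int)) :
    calculate_detailed_metrics pr ar =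
      ((ar.countP (fun a => pr.any (fun p => pvOverlaps p a)) : Int),
       (pr.countP (fun p => !(ar.any (fun a => pvOverlaps p a))) : Int),
       (ar.countP (fun a => !(pr.any (fun p => pvOverlaps p a))) : Int)) := by
  rw [pvA_eq]
  simp only []
  rw [pvOuter_tp, pvOuter_fn, pv_fp_fold, pv_tpcnt_aux, pv_fncnt_aux]
  have hfpcnt : ((PySem.List.enumerate (pr.map pvASetOf) 0).countP
      (fun jp => !PySem.Set.contains
        (pvOuter (PySem.List.enumerate (pr.map pvASetOf) 0)
          (PySem.List.enumerate (ar.map pvASetOf) 0)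
          (0, 0, PySem.Set.empty, PySem.Set.empty)).2.2.1 jp.1))
      = pr.countP (fun p => !(ar.any (fun a => pvOverlaps p a))) := by
    rw [← pv_fpcnt_aux ar pr 0]
    apply List.countP_congr
    intro jp hjp
    have hc : PySem.Set.contains
        (pvOuter (PySem.List.enumerate (pr.map pvASetOf) 0)
          (PySem.List.enumerate (ar.map pvASetOf) 0)
          (0, 0, PySem.Set.empty, PySem.Set.empty)).2.2.1 jp.1
        = ar.any (fun a => decide (PySem.Set.inter (pvASetOf a) jp.2 ≠ [])) := by
      rw [Bool.eq_iff_iff, PySem.Set.contains_iff, pvOuter_mp, List.any_eq_true]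
      constructor
      · rintro (hm | ⟨jp', hjp', h1, hex⟩)
        · simp [PySem.Set.empty] at hm
        · have heq : jp' = jp := pv_enum_index_inj hjp' hjp h1
          rw [heq] at hex
          obtain ⟨a, ha, h2⟩ := (pv_exists_enum ar jp.2 0).mp hex
          exact ⟨a, ha, by simpa using h2⟩
      · rintro ⟨a, ha, h2⟩
        exact Or.inr ⟨jp, hjp, rfl, (pv_exists_enum ar jp.2 0).mpr ⟨a, ha, by simpa using h2⟩⟩
    rw [hc]
  rw [hfpcnt]
  simp only [zero_add]

-- ===== B-side: the sort-and-binary-search index answers 'any overlap' =====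

-- entry i of the prefix-maximum list dominates s iff the seed or some end up to i does
lemma pvMaxends_getD (b : Option Int) (l : List (Int × Int)) (i : Nat) (h : i < l.length) (s : Int) :
    (s ≤ (pvMaxends b l).getD i 0)
      ↔ ((∃ b0, b = some b0 ∧ s ≤ b0) ∨ ∃ j, ∃ hj : j < l.length, j ≤ i ∧ s ≤ l[j].2) := by
  induction l generalizing b i with
  | nil => simp at h
  | cons r rs ih =>
    cases i with
    | zero =>
      simp only [pvMaxends, List.getD_cons_zero]
      cases b with
      | none =>
        constructor
        · intro hs; exact Or.inr ⟨0, by simp, by simp, by simpa using hs⟩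
        · rintro (⟨b0, hb0, _⟩ | ⟨j, hj, hji, hs⟩)
          · simp at hb0
          · interval_cases j
            simpa using hs
      | some b0 =>
        constructor
        · intro hs
          by_cases hc : r.2 > b0
          · simp only [if_pos hc] at hs
            exact Or.inr ⟨0, by simp, by simp, by simpa using hs⟩
          · simp only [if_neg hc] at hs
            exact Or.inl ⟨b0, rfl, hs⟩
        · rintro (⟨b1, hb1, hs⟩ | ⟨j, hj, hji, hs⟩)
          · cases hb1
            dsimp only; split_ifs with hc <;> omega
          · interval_cases j
            simp only [List.getElem_cons_zero] at hs
            dsimp only; split_ifs with hc <;> omega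
    | succ i' =>
      simp only [pvMaxends, List.getD_cons_succ]
      have h' : i' < rs.length := by simpa using Nat.lt_of_succ_lt_succ (by simpa using h)
      rw [ih _ i' h']
      constructor
      · rintro (⟨b1, hb1, hs⟩ | ⟨j, hj, hji, hs⟩)
        · -- the new seed is max of old seed and r.2
          cases hb1
          cases b with
          | none =>
            exact Or.inr ⟨0, by simp, by omega, by simpa using hs⟩
          | some b0 =>
            by_cases hc : r.2 > b0
            · simp only [if_pos hc] at hs
              exact Or.inr ⟨0, by simp, by omega, by simpa using hs⟩
            · simp only [if_neg hc] at hs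
              exact Or.inl ⟨b0, rfl, hs⟩
        · exact Or.inr ⟨j + 1, by simpa using Nat.succ_lt_succ hj, by omega, by simpa using hs⟩
      · rintro (⟨b1, hb1, hs⟩ | ⟨j, hj, hji, hs⟩)
        · cases hb1
          refine Or.inl ⟨_, rfl, ?_⟩
          dsimp only; split_ifs with hc <;> omega
        · cases j with
          | zero =>
            refine Or.inl ⟨_, rfl, ?_⟩
            simp only [List.getElem_cons_zero] at hs
            cases b with
            | none => simpa using hs
            | some b0 => dsimp only; split_ifs with hc <;> omega
          | succ j' =>
            have hj' : j' < rs.length := by simpa using Nat.lt_of_succ_lt_succ hj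
            exact Or.inr ⟨j', hj', by omega, by simpa using hs⟩

-- the while-loop is bisect_right: binary search on a nondecreasing list
lemma pvBisect_spec (starts : List Int) (e : Int)
    (hsort : ∀ i j : Nat, i ≤ j → j < starts.length → starts.getD i 0 ≤ starts.getD j 0) :
    ∀ (n lo hi : Nat), hi - lo ≤ n → lo ≤ hi → hi ≤ starts.length →
    (∀ i, i < lo → starts.getD i 0 ≤ e) →
    (∀ i, hi ≤ i → i < starts.length → e < starts.getD i 0) →
    lo ≤ pvBisect starts e lo hi ∧ pvBisect starts e lo hi ≤ hi ∧
      (∀ i, i < pvBisect starts e lo hi → starts.getD i 0 ≤ e) ∧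
      (∀ i, pvBisect starts e lo hi ≤ i → i < starts.length → e < starts.getD i 0) := by
  intro n
  induction n with
  | zero =>
    intro lo hi hn hlh hhi hlow hhigh
    have : lo = hi := by omega
    subst this
    rw [pvBisect]
    simp only [lt_irrefl, dif_neg, not_false_iff]
    exact ⟨le_refl _, le_refl _, hlow, hhigh⟩
  | succ n ih =>
    intro lo hi hn hlh hhi hlow hhigh
    rw [pvBisect]
    by_cases hlt : lo < hi
    · simp only [dif_pos hlt]
      set mid := (lo + hi) / 2 with hmid
      by_cases hc : starts.getD mid 0 ≤ e
      · simp only [if_pos hc]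
        have := ih (mid + 1) hi (by omega) (by omega) hhi
          (fun i hi' => by
            by_cases h' : i ≤ mid
            · exact le_trans (hsort i mid h' (by omega)) hc
            · omega)
          hhigh
        exact ⟨by omega, this.2.1, this.2.2.1, this.2.2.2⟩
      · simp only [if_neg hc]
        have := ih lo mid (by omega) (by omega) (by omega) hlow
          (fun i hmi hil => lt_of_not_ge (fun hge => hc (le_trans (hsort mid i hmi hil) hge)))
        exact ⟨this.1, by omega, this.2.2.1, this.2.2.2⟩
    · simp only [dif_neg hlt]
      have : lo = hi := by omega
      subst this
      exact ⟨le_refl _, le_refl _, hlow, hhigh⟩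

-- hits(build(P), s, e) ↔ some range of P overlaps [s, e]
lemma pvHits_any (P : List (Int × Int)) (s e : Int) :
    pvHits (pvBuild P) s e = P.any (fun p => pvOverlaps p (s, e)) := by
  by_cases hse : s > e
  · simp only [pvHits, if_pos hse]
    symm
    simp only [List.any_eq_false]
    intro p _
    simp only [pvOverlaps, decide_eq_true_eq]
    omega
  · set srt := PySem.List.sorted (P.filter (fun r => decide (r.1 ≤ r.2))) (fun r => r.1) false with hsrt
    have hpair : (srt.map (fun r => r.1)).Pairwise (· ≤ ·) := by
      rw [hsrt]
      exact PySem.List.sorted_map_key_pairwise _ _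
    have hsortD : ∀ i j : Nat, i ≤ j → j < (srt.map (fun r => r.1)).length →
        (srt.map (fun r => r.1)).getD i 0 ≤ (srt.map (fun r => r.1)).getD j 0 := by
      intro i j hij hj
      rcases Nat.eq_or_lt_of_le hij with rfl | hlt
      · exact le_refl _
      · rw [List.getD_eq_getElem _ _ (by omega), List.getD_eq_getElem _ _ hj]
        exact List.pairwise_iff_getElem.mp hpair i j (by omega) hj hlt
    set starts := srt.map (fun r => r.1) with hstarts
    set r := pvBisect starts e 0 starts.length with hr
    obtain ⟨_, hrle, hlt_r, hge_r⟩ := pvBisect_spec starts e hsortD starts.length 0 starts.length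
      (by omega) (by omega) (le_refl _) (by omega) (by omega)
    have hlen : starts.length = srt.length := by simp [hstarts]
    have hstartsD : ∀ i : Nat, (h : i < srt.length) → starts.getD i 0 = srt[i].1 := by
      intro i h
      rw [hstarts, List.getD_eq_getElem _ _ (by simpa using h), List.getElem_map]
    -- both sides as the same existential
    have hmain : pvHits (pvBuild P) s e = true ↔ ∃ p ∈ P, pvOverlaps p (s, e) = true := by
      have hB : pvHits (pvBuild P) s e = true ↔
          (0 < r ∧ s ≤ (pvMaxends none srt).getD (r - 1) 0) := by
        simp only [pvHits, pvBuild, if_neg hse, Bool.and_eq_true, decide_eq_true_eq]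
        rw [← hsrt, ← hstarts, ← hr]
      rw [hB]
      constructor
      · rintro ⟨hr0, hsm⟩
        have hrlen : r - 1 < srt.length := by omega
        obtain (⟨b0, hb0, _⟩ | ⟨j, hj, hji, hjs⟩) :=
          (pvMaxends_getD none srt (r - 1) hrlen s).mp hsm
        · cases hb0
        have hje : srt[j].1 ≤ e := by
          rw [← hstartsD j hj]
          exact hlt_r j (by omega)
        have hmem : srt[j] ∈ srt := List.getElem_mem _
        have hmem2 : srt[j] ∈ P.filter (fun r => decide (r.1 ≤ r.2)) := by
          exact (PySem.List.mem_sorted _ _ _ _).mp hmem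
        rw [List.mem_filter] at hmem2
        refine ⟨srt[j], hmem2.1, ?_⟩
        have hne : srt[j].1 ≤ srt[j].2 := by simpa using hmem2.2
        simp only [pvOverlaps, decide_eq_true_eq]
        omega
      · rintro ⟨p, hp, hov⟩
        simp only [pvOverlaps, decide_eq_true_eq] at hov
        have hpF : p ∈ P.filter (fun r => decide (r.1 ≤ r.2)) := by
          rw [List.mem_filter]
          exact ⟨hp, by simp; omega⟩
        have hpsrt : p ∈ srt := (PySem.List.mem_sorted _ _ _ _).mpr hpF
        obtain ⟨i, hi, hpi⟩ := List.mem_iff_getElem.mp hpsrt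
        have hie : starts.getD i 0 ≤ e := by
          rw [hstartsD i hi, hpi]; omega
        have hir : i < r := by
          by_contra hge
          exact absurd hie (not_le_of_gt (hge_r i (by omega) (by omega)))
        refine ⟨by omega, ?_⟩
        apply (pvMaxends_getD none srt (r - 1) (by omega) s).mpr
        exact Or.inr ⟨i, hi, by omega, by rw [hpi]; omega⟩
    rw [Bool.eq_iff_iff, hmain, List.any_eq_true]

lemma pvOverlaps_pair_swap (p a : Int × Int) : pvOverlaps a (p.1, p.2) = pvOverlaps p a := by
  simp only [pvOverlaps, decide_eq_decide]
  omega

-- B reduced to the same canonical countP triple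
lemma pvB_countP (pr ar : List (Int × Int)) :
    calculate_detailed_metrics_alt pr ar =
      ((ar.countP (fun a => pr.any (fun p => pvOverlaps p a)) : Int),
       (pr.countP (fun p => !(ar.any (fun a => pvOverlaps p a))) : Int),
       (ar.length : Int) - (ar.countP (fun a => pr.any (fun p => pvOverlaps p a)) : Int)) := by
  unfold calculate_detailed_metrics_alt
  simp only []
  have htp : ar.countP (fun a => pvHits (pvBuild pr) a.1 a.2)
      = ar.countP (fun a => pr.any (fun p => pvOverlaps p a)) := by
    apply List.countP_congr
    intro a _
    rw [pvHits_any]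
  have hfp : pr.countP (fun p => !(pvHits (pvBuild ar) p.1 p.2))
      = pr.countP (fun p => !(ar.any (fun a => pvOverlaps p a))) := by
    apply List.countP_congr
    intro p _
    rw [pvHits_any]
    simp only [pvOverlaps_pair_swap]
  rw [htp, hfp]

-- ===== VERDICT (by name: the statement is the Claim_ definition above) =====
theorem calculate_detailed_metrics_spec : Claim_equal_calculate_detailed_metrics := by
  intro pr ar _
  show calculate_detailed_metrics pr ar = calculate_detailed_metrics_alt pr ar
  rw [pvA_countP, pvB_countP]
  refine Prod.ext rfl (Prod.ext rfl ?_)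
  have := pv_cnt_split (fun a => pr.any (fun p => pvOverlaps p a)) ar
  simp only []
  omega
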